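-- pv_equiv track=rewrite | github.com/Ashudeshwal/DFA-Function-Solution | dfaCode.py | isAcceptedString
-- ===== SOURCE A (Python) =====
-- def startStateQ0(s):
--     if (s == 'a'):
--         state = 1
--     elif (s == 'b'):
--         state = 3
--     else:
--         state = -1
--     return state
--
-- def firstStateQ1(s):
--     if (s == 'a'):
--         state = 2
--     elif (s == 'b'):
--         state = 4
--     else:
--         state = -1
--     return state
--
-- def secondStateQ2(s):
--     if (s == 'b'):
--         state = 3
--     elif (s == 'a'):
--         state = 1
--     else:
--         state = -1
--     return state
--
-- def thirdStateQ3(s):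
--     if (s == 'b'):
--         state = 3
--     elif (s == 'a'):
--         state = 4
--     else:
--         state = -1
--     return state
--
-- def fourthStateQ4(s):
--     if(s == 'a'):
--         state = 2
--     elif(s == 'b'):
--         state = 3
--     else:
--         state = -1
--     return state
--
-- def isAcceptedString(String):
--
--     l = len(String)
--
--     # dfa tells the number associated
--     # with the present dfa = state
--     state = 0
--     for i in range(l):
--         if (state == 0):
--             state = startStateQ0(String[i])
--
--         elif (state == 1):
--             state = firstStateQ1(String[i])
--
--         elif (state == 2) :
--             state = secondStateQ2(String[i])
--
--         elif (state == 3) :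
--             state = thirdStateQ3(String[i])
--
--         elif (state == 4) :
--             state = fourthStateQ4(String[i])
--         else:
--             return 0
--     if(state == 3 or state == 1) :
--         return 1
--     else:
--         return 0
-- ===== SOURCE B (Python) =====
-- T = {('a', 0): 1, ('b', 0): 3,
--      ('a', 1): 2, ('b', 1): 4,
--      ('a', 2): 1, ('b', 2): 3,
--      ('a', 3): 4, ('b', 3): 3,
--      ('a', 4): 2, ('b', 4): 3}
--
-- def isAcceptedString(String):
--     # Backward set-simulation: walk the string in REVERSE, maintaining the set of
--     # states from which the remaining (forward) suffix is accepted; accept iff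
--     # the start state 0 survives to the front.
--     good = {1, 3}
--     for ch in reversed(String):
--         if ch not in 'ab':
--             return 0
--         good = {s for s in range(5) if T[(ch, s)] in good}
--     return 1 if 0 in good else 0
-- ===== Notes on version B (the rewrite author's own statement) =====
-- stated objective: alternative
-- what changed: B simulates the DFA backwards: it walks the string in reverse maintaining the SET of states from which the remaining forward suffix is accepted (a pre-image computation over a (char,state)->state table), and accepts iff the start state 0 ends up in that set, instead of A's forward single-state run through five per-state helper functions.
import Mathlib
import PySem

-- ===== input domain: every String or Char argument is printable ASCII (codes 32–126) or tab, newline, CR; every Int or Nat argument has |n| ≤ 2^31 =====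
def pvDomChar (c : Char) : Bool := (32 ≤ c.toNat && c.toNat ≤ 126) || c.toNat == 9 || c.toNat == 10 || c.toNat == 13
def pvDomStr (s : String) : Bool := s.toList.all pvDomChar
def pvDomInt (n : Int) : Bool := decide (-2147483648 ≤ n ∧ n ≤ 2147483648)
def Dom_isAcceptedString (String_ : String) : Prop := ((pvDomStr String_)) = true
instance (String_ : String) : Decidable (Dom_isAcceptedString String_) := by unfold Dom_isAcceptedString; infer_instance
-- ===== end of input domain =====

-- B replaces A's forward single-state run (five helper functions + if/elif dispatch)
-- by a BACKWARD set-simulation over the reversed string; same values on every input.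

-- ===== PORT A =====
def startStateQ0 (s : Char) : Int := if s = 'a' then 1 else if s = 'b' then 3 else -1
def firstStateQ1 (s : Char) : Int := if s = 'a' then 2 else if s = 'b' then 4 else -1
def secondStateQ2 (s : Char) : Int := if s = 'b' then 3 else if s = 'a' then 1 else -1
def thirdStateQ3 (s : Char) : Int := if s = 'b' then 3 else if s = 'a' then 4 else -1
def fourthStateQ4 (s : Char) : Int := if s = 'a' then 2 else if s = 'b' then 3 else -1

-- the for-loop with its early 'return 0' and the final accept check
def isAcceptedLoopA : Int → List Char → Int
  | state, [] => if state = 3 ∨ state = 1 then 1 else 0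
  | state, c :: cs =>
    if state = 0 then isAcceptedLoopA (startStateQ0 c) cs
    else if state = 1 then isAcceptedLoopA (firstStateQ1 c) cs
    else if state = 2 then isAcceptedLoopA (secondStateQ2 c) cs
    else if state = 3 then isAcceptedLoopA (thirdStateQ3 c) cs
    else if state = 4 then isAcceptedLoopA (fourthStateQ4 c) cs
    else 0

def isAcceptedString (String_ : String) : Int := isAcceptedLoopA 0 String_.toList

-- ===== PORT B =====
-- the module-level transition table T, keyed by (character, state)
def dfaT : PySem.Dict (Char × Int) Int :=
  PySem.Dict.ofList
    [ (('a', 0), 1), (('b', 0), 3)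
    , (('a', 1), 2), (('b', 1), 4)
    , (('a', 2), 1), (('b', 2), 3)
    , (('a', 3), 4), (('b', 3), 3)
    , (('a', 4), 2), (('b', 4), 3) ]

-- 'for ch in reversed(String)' over the reversed character list; 'good' is the set of
-- states from which the remaining forward suffix is accepted.
-- T[(ch, s)]: the key is always present (ch ∈ {a,b}, s ∈ range(5)), KeyError unreachable;
-- getD (-1) is that total lookup.
def isAcceptedLoopB : PySem.Set Int → List Char → Int
  | good, [] => if PySem.Set.contains good 0 then 1 else 0
  | good, c :: cs =>
    if !(c == 'a' || c == 'b') then 0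
    else
      isAcceptedLoopB
        (PySem.Set.ofList ((PySem.List.pyRange 0 5 1).filter
          (fun s => PySem.Set.contains good ((dfaT.get? (c, s)).getD (-1))))) cs

def isAcceptedString_alt (String_ : String) : Int :=
  isAcceptedLoopB (PySem.Set.ofList [1, 3]) String_.toList.reverse

-- ===== PRECONDITION & SPEC =====
def Spec_isAcceptedString (String_ : String) (out : Int) : Prop := out = isAcceptedString_alt String_
instance (String_ : String) (out : Int) : Decidable (Spec_isAcceptedString String_ out) := by unfold Spec_isAcceptedString; infer_instance

-- ===== CLAIM (what is proved, stated in full; the proofs are below) =====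
def Claim_equal_isAcceptedString : Prop := ∀ (String_ : String), Dom_isAcceptedString String_ → Spec_isAcceptedString String_ (isAcceptedString String_)

-- ===== LEMMAS AND PROOFS =====

-- proof-side abbreviations: the DFA step and the forward run
def stepF (c : Char) (s : Int) : Int := (dfaT.get? (c, s)).getD (-1)
def runA (s : Int) (l : List Char) : Int := l.foldl (fun s c => stepF c s) s

def inR (s : Int) : Prop := s = 0 ∨ s = 1 ∨ s = 2 ∨ s = 3 ∨ s = 4

lemma runA_cons (s : Int) (c : Char) (cs : List Char) :
    runA s (c :: cs) = runA (stepF c s) cs := rfl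

lemma runA_append_singleton (s : Int) (l : List Char) (c : Char) :
    runA s (l ++ [c]) = stepF c (runA s l) := by
  simp [runA, List.foldl_append]

lemma stepF_mem {c : Char} {s : Int} (hc : c = 'a' ∨ c = 'b') (hs : inR s) :
    inR (stepF c s) := by
  rcases hc with rfl | rfl <;> rcases hs with rfl | rfl | rfl | rfl | rfl <;>
    (unfold inR; decide)

lemma runA_mem {l : List Char} {s : Int}
    (hl : ∀ c ∈ l, c = 'a' ∨ c = 'b') (hs : inR s) : inR (runA s l) := by
  induction l generalizing s with
  | nil => exact hs
  | cons c cs ih =>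
    rw [runA_cons]
    exact ih (fun x hx => hl x (List.mem_cons_of_mem _ hx))
      (stepF_mem (hl c (List.mem_cons_self)) hs)

-- once A's state turns -1, the rest of the run yields 0
lemma loopA_neg : ∀ (cs : List Char), isAcceptedLoopA (-1) cs = 0 := by
  intro cs; cases cs <;> simp [isAcceptedLoopA]

-- A's dispatch equals the table step on valid states and characters
lemma dispatch_eq {c : Char} {s : Int} (hc : c = 'a' ∨ c = 'b') (hs : inR s)
    (cs : List Char) : isAcceptedLoopA s (c :: cs) = isAcceptedLoopA (stepF c s) cs := by
  rcases hc with rfl | rfl <;> rcases hs with rfl | rfl | rfl | rfl | rfl <;>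
    · simp only [isAcceptedLoopA, startStateQ0, firstStateQ1, secondStateQ2, thirdStateQ3,
        fourthStateQ4]
      try norm_num
      try congr 1
      all_goals decide

-- characterisation of A's loop: valid run to an accepting state, else 0
lemma lemA : ∀ (cs : List Char) (s : Int), inR s →
    isAcceptedLoopA s cs =
      if cs.all (fun c => c == 'a' || c == 'b') then
        (if runA s cs = 1 ∨ runA s cs = 3 then 1 else 0) else 0 := by
  intro cs
  induction cs with
  | nil =>
    rintro s (rfl | rfl | rfl | rfl | rfl) <;> decide
  | cons c cs ih =>
    intro s hs
    by_cases hc : c = 'a' ∨ c = 'b'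
    · rw [dispatch_eq hc hs, ih _ (stepF_mem hc hs), runA_cons]
      rcases hc with rfl | rfl <;> simp
    · have h1 : (c == 'a') = false := by
        simp; intro h; exact hc (Or.inl h)
      have h2 : (c == 'b') = false := by
        simp; intro h; exact hc (Or.inr h)
      have hl : isAcceptedLoopA s (c :: cs) = isAcceptedLoopA (-1) cs := by
        rcases hs with rfl | rfl | rfl | rfl | rfl <;>
          simp_all [isAcceptedLoopA, startStateQ0, firstStateQ1, secondStateQ2,
            thirdStateQ3, fourthStateQ4]
      rw [hl, loopA_neg]
      simp [h1, h2]

-- one backward step of B: membership in the new set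
lemma stepB_contains (c : Char) (g : PySem.Set Int) {t : Int} (ht : inR t) :
    PySem.Set.contains
      (PySem.Set.ofList ((PySem.List.pyRange 0 5 1).filter
        (fun s => PySem.Set.contains g ((dfaT.get? (c, s)).getD (-1))))) t
      = PySem.Set.contains g (stepF c t) := by
  have hrange : PySem.List.pyRange 0 5 1 = [0, 1, 2, 3, 4] := by decide
  rw [hrange, Bool.eq_iff_iff, PySem.Set.contains_iff, PySem.Set.mem_ofList,
    List.mem_filter]
  constructor
  · rintro ⟨_, h⟩
    exact h
  · intro h
    refine ⟨?_, h⟩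
    rcases ht with rfl | rfl | rfl | rfl | rfl <;> decide

-- characterisation of B's loop on an arbitrary set
lemma lemB : ∀ (l : List Char) (g : PySem.Set Int),
    isAcceptedLoopB g l =
      if l.all (fun c => c == 'a' || c == 'b') then
        (if PySem.Set.contains g (runA 0 l.reverse) then 1 else 0) else 0 := by
  intro l
  induction l with
  | nil => intro g; simp [isAcceptedLoopB, runA]
  | cons c cs ih =>
    intro g
    by_cases hc : c = 'a' ∨ c = 'b'
    · have hcb : (c == 'a' || c == 'b') = true := by
        rcases hc with rfl | rfl <;> decide
      simp only [isAcceptedLoopB, hcb, Bool.not_true, Bool.false_eq_true, if_false, ih,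
        List.all_cons, Bool.true_and, List.reverse_cons]
      by_cases hall : cs.all (fun c => c == 'a' || c == 'b') = true
      · have hval : ∀ x ∈ cs.reverse, x = 'a' ∨ x = 'b' := by
          intro x hx
          have := List.all_eq_true.mp hall x (List.mem_reverse.mp hx)
          simpa using this
        have ht : inR (runA 0 cs.reverse) := runA_mem hval (Or.inl rfl)
        rw [if_pos hall, if_pos hall,
          stepB_contains c g ht, runA_append_singleton]
      · rw [if_neg hall, if_neg hall]
    · have hcb : (c == 'a' || c == 'b') = false := by
        simp only [Bool.or_eq_false_iff, beq_eq_false_iff_ne, ne_eq]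
        exact ⟨fun h => hc (Or.inl h), fun h => hc (Or.inr h)⟩
      simp [isAcceptedLoopB, hcb]

-- ===== VERDICT (by name: the statement is the Claim_ definition above) =====
theorem isAcceptedString_spec : Claim_equal_isAcceptedString := by
  intro s _
  unfold Spec_isAcceptedString isAcceptedString isAcceptedString_alt
  rw [lemB, lemA _ _ (Or.inl rfl), List.all_reverse, List.reverse_reverse]
  by_cases hall : s.toList.all (fun c => c == 'a' || c == 'b') = true
  · rw [if_pos hall, if_pos hall]
    have : PySem.Set.ofList ([1, 3] : List Int) = [1, 3] := by decide
    rw [this]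
    by_cases h : runA 0 s.toList = 1 ∨ runA 0 s.toList = 3
    · rw [if_pos h, if_pos]
      simp [PySem.Set.contains]
      rcases h with h | h <;> simp [h]
    · rw [if_neg h, if_neg]
      simp [PySem.Set.contains]
      rw [not_or] at h
      exact ⟨h.1, h.2⟩
  · rw [if_neg hall, if_neg hall]
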